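-- pv_equiv track=rewrite | github.com/VinhAlth/Pumpkin_AIC_2024 | api/utility.py | group_images
-- ===== SOURCE A (Python) =====
-- def group_images(duplicates):
--     visited = set()
--     groups = []
--
--     def dfs(image, group):
--         if image not in visited:
--             visited.add(image)
--             group.add(image)
--             for dup in duplicates.get(image, []):
--                 if dup not in visited:
--                     dfs(dup, group)
--
--     for image in duplicates:
--         if image not in visited:
--             group = set()
--             dfs(image, group)
--             # Append the group, ensuring all images including those with no duplicates are included
--             groups.append(sorted(group))
--
--     return groups
-- ===== SOURCE B (Python) =====
-- def group_images(duplicates):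
--     visited = set()
--     groups = []
--     for image in duplicates:
--         if image in visited:
--             continue
--         group = []
--         stack = [image]
--         while stack:
--             node = stack.pop()
--             if node in visited:
--                 continue
--             visited.add(node)
--             group.append(node)
--             for nb in reversed(duplicates.get(node, [])):
--                 stack.append(nb)
--         groups.append(sorted(group))
--     return groups
-- ===== Notes on version B (the rewrite author's own statement) =====
-- stated objective: alternative
-- what changed: Replaces A's recursive DFS helper (mutating a set-valued group) with an iterative explicit-stack DFS that collects each group as a list in visit order, pushing neighbours in reverse; same outputs, no recursion.
import Mathlib
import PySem

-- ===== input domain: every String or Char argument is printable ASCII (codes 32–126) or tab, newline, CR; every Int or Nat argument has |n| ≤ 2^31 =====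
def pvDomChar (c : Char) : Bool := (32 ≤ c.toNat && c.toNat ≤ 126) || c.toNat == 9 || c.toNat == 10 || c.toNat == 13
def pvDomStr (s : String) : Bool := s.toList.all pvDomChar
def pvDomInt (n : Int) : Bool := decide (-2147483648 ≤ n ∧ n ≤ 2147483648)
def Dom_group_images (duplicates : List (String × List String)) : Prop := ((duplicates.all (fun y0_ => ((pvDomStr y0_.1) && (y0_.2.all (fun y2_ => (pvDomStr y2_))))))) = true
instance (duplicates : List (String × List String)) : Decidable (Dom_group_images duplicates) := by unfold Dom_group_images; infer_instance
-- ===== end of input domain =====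

-- B replaces A's recursive DFS with an iterative explicit-stack DFS (same return value; objective: alternative decomposition).

-- ===== PORT A =====
-- duplicates.get(image, []) on the dict built from the association list
def pvGetD (d : PySem.Dict String (List String)) (k : String) : List String :=
  PySem.Dict.getD d k []

-- every node the algorithm can visit: the dict's keys and all listed duplicates;
-- |pvUniv d| + 1 is the fuel both ports pass (fuel is a totality guard, consumed only on first visits)
def pvUniv (d : PySem.Dict String (List String)) : List String :=
  PySem.Dict.keys d ++ (PySem.Dict.values d).flatten

mutual
-- A's recursive dfs(image, group): the state (visited, group) is threaded explicitly
def pvDfsA (d : PySem.Dict String (List String)) :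
    Nat → String → PySem.Set String → PySem.Set String →
    PySem.Set String × PySem.Set String
  | 0, _, V, G => (V, G)
  | Nat.succ f, x, V, G =>
      if x ∈ V then (V, G)
      else pvDfsAList d f (pvGetD d x) (PySem.Set.add V x) (PySem.Set.add G x)
termination_by f _ _ _ => (f, 0)

-- A's 'for dup in duplicates.get(image, []): if dup not in visited: dfs(dup, group)'
def pvDfsAList (d : PySem.Dict String (List String)) :
    Nat → List String → PySem.Set String → PySem.Set String →
    PySem.Set String × PySem.Set String
  | _, [], V, G => (V, G)
  | f, u :: rest, V, G =>
      let s := if u ∈ V then (V, G) else pvDfsA d f u V G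
      pvDfsAList d f rest s.1 s.2
termination_by f l _ _ => (f, l.length + 1)
end

def group_images (duplicates : List (String × List String)) : List (List String) :=
  let d := PySem.Dict.ofList duplicates
  let fuel := (pvUniv d).length + 1
  ((PySem.Dict.keys d).foldl
    (fun (st : PySem.Set String × List (List String)) image =>
      if image ∈ st.1 then st
      else
        let r := pvDfsA d fuel image st.1 PySem.Set.empty   -- group = set(); dfs(image, group)
        (r.1, st.2 ++ [PySem.List.sorted r.2 (fun x => x)]))
    (PySem.Set.empty, [])).2

-- ===== PORT B =====
-- B's 'while stack: node = stack.pop(); …'; the Python list-stack is modeled top-first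
-- (head = Python's end), so 'for nb in reversed(…): stack.append(nb)' is a foldl pushing on the head
def pvLoopB (d : PySem.Dict String (List String)) :
    Nat → List String → PySem.Set String → List String →
    PySem.Set String × List String
  | _, [], V, G => (V, G)
  | 0, _ :: _, V, G => (V, G)   -- fuel exhausted (unreachable for the fuel the port passes)
  | Nat.succ f, n :: S, V, G =>
      if n ∈ V then pvLoopB d (Nat.succ f) S V G
      else pvLoopB d f
        (((pvGetD d n).reverse).foldl (fun s nb => nb :: s) S)
        (PySem.Set.add V n) (G ++ [n])
termination_by f S _ _ => (f, S.length)

def group_images_alt (duplicates : List (String × List String)) : List (List String) :=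
  let d := PySem.Dict.ofList duplicates
  let fuel := (pvUniv d).length + 1
  ((PySem.Dict.keys d).foldl
    (fun (st : PySem.Set String × List (List String)) image =>
      if image ∈ st.1 then st
      else
        let r := pvLoopB d fuel [image] st.1 []
        (r.1, st.2 ++ [PySem.List.sorted r.2 (fun x => x)]))
    (PySem.Set.empty, [])).2

-- ===== PRECONDITION & SPEC =====
def Spec_group_images (duplicates : List (String × List String)) (out : List (List String)) : Prop := out = group_images_alt duplicates
instance (duplicates : List (String × List String)) (out : List (List String)) : Decidable (Spec_group_images duplicates out) := by unfold Spec_group_images; infer_instance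

-- ===== CLAIM (what is proved, stated in full; the proofs are below) =====
def Claim_equal_group_images : Prop := ∀ (duplicates : List (String × List String)), Dom_group_images duplicates → Spec_group_images duplicates (group_images duplicates)

-- ===== LEMMAS AND PROOFS =====

-- number of universe nodes not yet visited: the induction measure of the whole development
def pvCard (d : PySem.Dict String (List String)) (V : List String) : Nat :=
  ((pvUniv d).toFinset \ V.toFinset).card

lemma pv_add_eq (V : PySem.Set String) (x : String) (h : x ∉ V) :
    PySem.Set.add V x = V ++ [x] := by
  simp [PySem.Set.add, h]

lemma pv_mem_add (V : PySem.Set String) (x y : String) :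
    y ∈ PySem.Set.add V x ↔ y ∈ V ∨ y = x := by
  by_cases hx : x ∈ V
  · simp [PySem.Set.add, hx]
    intro h; subst h; exact hx
  · simp [pv_add_eq V x hx]

lemma pvCard_le_of_subset (d : PySem.Dict String (List String)) {V V' : List String}
    (h : V ⊆ V') : pvCard d V' ≤ pvCard d V := by
  apply Finset.card_le_card
  intro y hy
  simp only [Finset.mem_sdiff, List.mem_toFinset] at hy ⊢
  exact ⟨hy.1, fun c => hy.2 (h c)⟩

lemma pvCard_add_lt (d : PySem.Dict String (List String)) {V : List String} {x : String}
    (hU : x ∈ pvUniv d) (hV : x ∉ V) :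
    pvCard d (PySem.Set.add V x) < pvCard d V := by
  rw [pv_add_eq V x hV]
  unfold pvCard
  have h1 : (V ++ [x]).toFinset = insert x V.toFinset := by
    ext y; simp [or_comm]
  rw [h1, Finset.sdiff_insert]
  apply Finset.card_erase_lt_of_mem
  simp [hU, hV]

lemma pvCard_lt_fuel (d : PySem.Dict String (List String)) (V : List String) :
    pvCard d V < (pvUniv d).length + 1 := by
  have h1 : pvCard d V ≤ (pvUniv d).toFinset.card := Finset.card_le_card (Finset.sdiff_subset)
  have h2 := (pvUniv d).toFinset_card_le
  omega

lemma pvGetD_sub (d : PySem.Dict String (List String)) (k : String) :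
    ∀ y ∈ pvGetD d k, y ∈ pvUniv d := by
  intro y hy
  unfold pvGetD PySem.Dict.getD PySem.Dict.get? at hy
  cases hf : List.find? (fun p => p.1 == k) d.items with
  | none => rw [hf] at hy; simp at hy
  | some p =>
      rw [hf] at hy
      simp only [Option.map_some, Option.getD_some] at hy
      have hp : p ∈ d.items := List.mem_of_find?_eq_some hf
      have hv : p.2 ∈ PySem.Dict.values d := List.mem_map_of_mem hp
      unfold pvUniv
      exact List.mem_append_right _ (List.mem_flatten.mpr ⟨p.2, hv, hy⟩)

-- monotonicity and the group-inside-visited invariant for A's dfs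
lemma pvDfsA_mono_inv (d : PySem.Dict String (List String)) : ∀ (f : Nat),
    (∀ x V G, V ⊆ (pvDfsA d f x V G).1 ∧
      (G ⊆ V → (pvDfsA d f x V G).2 ⊆ (pvDfsA d f x V G).1)) ∧
    (∀ xs V G, V ⊆ (pvDfsAList d f xs V G).1 ∧
      (G ⊆ V → (pvDfsAList d f xs V G).2 ⊆ (pvDfsAList d f xs V G).1)) := by
  intro f
  induction f with
  | zero =>
      constructor
      · intro x V G; simp [pvDfsA]
      · intro xs
        induction xs with
        | nil => intro V G; simp [pvDfsAList]
        | cons u rest ih =>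
            intro V G
            by_cases hu : u ∈ V <;> simpa [pvDfsAList, pvDfsA, hu] using ih V G
  | succ f ihf =>
      have part1 : ∀ x V G, V ⊆ (pvDfsA d (f+1) x V G).1 ∧
          (G ⊆ V → (pvDfsA d (f+1) x V G).2 ⊆ (pvDfsA d (f+1) x V G).1) := by
        intro x V G
        by_cases hx : x ∈ V
        · simp [pvDfsA, hx]
        · simp only [pvDfsA, hx, if_false]
          obtain ⟨hm, hi⟩ := ihf.2 (pvGetD d x) (PySem.Set.add V x) (PySem.Set.add G x)
          refine ⟨fun y hy => hm ((pv_mem_add V x y).mpr (Or.inl hy)), fun hGV => hi ?_⟩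
          intro y hy
          rcases (pv_mem_add G x y).mp hy with h | h
          · exact (pv_mem_add V x y).mpr (Or.inl (hGV h))
          · exact (pv_mem_add V x y).mpr (Or.inr h)
      refine ⟨part1, ?_⟩
      intro xs
      induction xs with
      | nil => intro V G; simp [pvDfsAList]
      | cons u rest ih =>
          intro V G
          by_cases hu : u ∈ V
          · simpa [pvDfsAList, hu] using ih V G
          · simp only [pvDfsAList, hu, if_false]
            obtain ⟨hm1, hi1⟩ := part1 u V G
            obtain ⟨hm2, hi2⟩ := ih (pvDfsA d (f+1) u V G).1 (pvDfsA d (f+1) u V G).2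
            exact ⟨fun y hy => hm2 (hm1 hy), fun hGV => hi2 (hi1 hGV)⟩

-- fuel irrelevance for B's loop: any two sufficient fuels give the same run
lemma pvSuffB (d : PySem.Dict String (List String)) : ∀ (N : Nat) (V : PySem.Set String),
    pvCard d V < N →
    ∀ (S G : List String) (f g : Nat),
      (∀ y ∈ S, y ∈ pvUniv d) → pvCard d V < f → pvCard d V < g →
      pvLoopB d f S V G = pvLoopB d g S V G := by
  intro N
  induction N with
  | zero => intro V h; omega
  | succ N ih =>
      intro V hN S G f g hS hf hg
      induction S generalizing G with
      | nil =>
          obtain ⟨f1, rfl⟩ : ∃ f1, f = f1 + 1 := ⟨f - 1, by omega⟩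
          obtain ⟨g1, rfl⟩ : ∃ g1, g = g1 + 1 := ⟨g - 1, by omega⟩
          simp [pvLoopB]
      | cons n S' ihS =>
          obtain ⟨f1, rfl⟩ : ∃ f1, f = f1 + 1 := ⟨f - 1, by omega⟩
          obtain ⟨g1, rfl⟩ : ∃ g1, g = g1 + 1 := ⟨g - 1, by omega⟩
          have hS' : ∀ y ∈ S', y ∈ pvUniv d := fun y hy => hS y (List.mem_cons_of_mem n hy)
          by_cases hn : n ∈ V
          · simp only [pvLoopB, hn, if_pos]
            exact ihS G hS'
          · have hnU : n ∈ pvUniv d := hS n List.mem_cons_self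
            have hlt := pvCard_add_lt d hnU hn
            simp only [pvLoopB, hn, if_false]
            apply ih (PySem.Set.add V n) (by omega)
            · intro y hy
              rw [List.foldl_flip_cons_eq_append'] at hy
              simp only [List.reverse_reverse] at hy
              rcases List.mem_append.mp hy with h | h
              · exact pvGetD_sub d n y h
              · exact hS' y h
            · omega
            · omega

-- the bridge: running B's stack loop on xs ++ S is running A's dfs over xs, then the loop on S
lemma pvBridge (d : PySem.Dict String (List String)) : ∀ (N : Nat) (V : PySem.Set String),
    pvCard d V < N →
    ∀ (xs S G : List String) (fA fB : Nat),
      (∀ y ∈ xs, y ∈ pvUniv d) → (∀ y ∈ S, y ∈ pvUniv d) → G ⊆ V →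
      pvCard d V < fA → pvCard d V < fB →
      pvLoopB d fB (xs ++ S) V G =
        pvLoopB d fB S (pvDfsAList d fA xs V G).1 (pvDfsAList d fA xs V G).2 := by
  intro N
  induction N with
  | zero => intro V h; omega
  | succ N ih =>
      intro V hN xs S G fA fB hxs hS hG hfA hfB
      induction xs generalizing G with
      | nil => simp [pvDfsAList]
      | cons u rest ihxs =>
          obtain ⟨fB1, rfl⟩ : ∃ fB1, fB = fB1 + 1 := ⟨fB - 1, by omega⟩
          obtain ⟨fA1, rfl⟩ : ∃ fA1, fA = fA1 + 1 := ⟨fA - 1, by omega⟩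
          have hrest : ∀ y ∈ rest, y ∈ pvUniv d := fun y hy => hxs y (List.mem_cons_of_mem u hy)
          by_cases hu : u ∈ V
          · have h1 : pvDfsAList d (fA1+1) (u :: rest) V G = pvDfsAList d (fA1+1) rest V G := by
              simp [pvDfsAList, hu]
            rw [h1]
            have h2 : pvLoopB d (fB1+1) ((u :: rest) ++ S) V G
                = pvLoopB d (fB1+1) (rest ++ S) V G := by
              simp [pvLoopB, hu]
            rw [h2]
            exact ihxs G hrest hG
          · have huU : u ∈ pvUniv d := hxs u List.mem_cons_self
            have hlt := pvCard_add_lt d huU hu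
            have hGu : u ∉ G := fun h => hu (hG h)
            -- unfold one B step
            have hB1 : pvLoopB d (fB1+1) ((u :: rest) ++ S) V G
                = pvLoopB d fB1 (pvGetD d u ++ (rest ++ S)) (PySem.Set.add V u) (G ++ [u]) := by
              simp only [List.cons_append, pvLoopB, hu, if_false]
              rw [List.foldl_flip_cons_eq_append']
              simp
            -- the A step
            have hA1 : pvDfsAList d (fA1+1) (u :: rest) V G
                = pvDfsAList d (fA1+1) rest
                    (pvDfsA d (fA1+1) u V G).1 (pvDfsA d (fA1+1) u V G).2 := by
              simp [pvDfsAList, hu]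
            have hA2 : pvDfsA d (fA1+1) u V G
                = pvDfsAList d fA1 (pvGetD d u) (PySem.Set.add V u) (G ++ [u]) := by
              rw [← pv_add_eq G u hGu]
              simp [pvDfsA, hu]
            set s := pvDfsA d (fA1+1) u V G with hs
            have hGV' : (G ++ [u]) ⊆ PySem.Set.add V u := by
              intro y hy
              rcases List.mem_append.mp hy with h | h
              · exact (pv_mem_add V u y).mpr (Or.inl (hG h))
              · simp at h; exact (pv_mem_add V u y).mpr (Or.inr h)
            -- first IH application: consume xs := neighbours of u
            have step1 : pvLoopB d fB1 (pvGetD d u ++ (rest ++ S)) (PySem.Set.add V u) (G ++ [u])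
                = pvLoopB d fB1 (rest ++ S) s.1 s.2 := by
              rw [hA2]
              apply ih (PySem.Set.add V u) (by omega)
              · exact pvGetD_sub d u
              · intro y hy
                rcases List.mem_append.mp hy with h | h
                · exact hrest y h
                · exact hS y h
              · exact hGV'
              · omega
              · omega
            -- invariants of s
            have hVs : PySem.Set.add V u ⊆ s.1 := by
              rw [hA2]
              exact ((pvDfsA_mono_inv d fA1).2 (pvGetD d u) (PySem.Set.add V u) (G ++ [u])).1
            have hGs : s.2 ⊆ s.1 := by
              rw [hA2]
              exact ((pvDfsA_mono_inv d fA1).2 (pvGetD d u) (PySem.Set.add V u) (G ++ [u])).2 hGV'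
            have hcs : pvCard d s.1 ≤ pvCard d (PySem.Set.add V u) := pvCard_le_of_subset d hVs
            -- second IH application: consume xs := rest
            have step2 : pvLoopB d fB1 (rest ++ S) s.1 s.2
                = pvLoopB d fB1 S (pvDfsAList d (fA1+1) rest s.1 s.2).1
                    (pvDfsAList d (fA1+1) rest s.1 s.2).2 := by
              apply ih s.1 (by omega) rest S s.2 (fA1+1) fB1 hrest hS hGs (by omega) (by omega)
            -- renormalise B's fuel
            have hr : s.1 ⊆ (pvDfsAList d (fA1+1) rest s.1 s.2).1 :=
              ((pvDfsA_mono_inv d (fA1+1)).2 rest s.1 s.2).1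
            have hcr : pvCard d (pvDfsAList d (fA1+1) rest s.1 s.2).1 ≤ pvCard d s.1 :=
              pvCard_le_of_subset d hr
            have step3 : pvLoopB d fB1 S (pvDfsAList d (fA1+1) rest s.1 s.2).1
                    (pvDfsAList d (fA1+1) rest s.1 s.2).2
                = pvLoopB d (fB1+1) S (pvDfsAList d (fA1+1) rest s.1 s.2).1
                    (pvDfsAList d (fA1+1) rest s.1 s.2).2 := by
              apply pvSuffB d (pvCard d (pvDfsAList d (fA1+1) rest s.1 s.2).1 + 1) _ (by omega)
                _ _ _ _ hS (by omega) (by omega)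
            rw [hB1, step1, step2, step3, hA1]

-- ===== VERDICT (by name: the statement is the Claim_ definition above) =====
theorem group_images_spec : Claim_equal_group_images := by
  intro duplicates _
  unfold Spec_group_images group_images group_images_alt
  simp only []
  congr 1
  apply PySem.List.foldl_congr_mem
  intro st image himg
  by_cases hm : image ∈ st.1
  · simp [hm]
  · simp only [hm, if_false, PySem.Set.empty]
    have himgU : image ∈ pvUniv (PySem.Dict.ofList duplicates) :=
      List.mem_append_left _ himg
    set d := PySem.Dict.ofList duplicates with hd
    set fuel := (pvUniv d).length + 1 with hfuel
    have hb := pvBridge d (pvCard d st.1 + 1) st.1 (by omega) [image] [] [] fuel fuel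
      (by intro y hy; simp at hy; subst hy; exact himgU)
      (by intro y hy; simp at hy)
      (by intro y hy; simp at hy)
      (pvCard_lt_fuel d st.1) (pvCard_lt_fuel d st.1)
    simp only [List.append_nil] at hb
    have hA : pvDfsAList d fuel [image] st.1 [] = pvDfsA d fuel image st.1 [] := by
      simp [pvDfsAList, hm]
    have hnil : ∀ V G, pvLoopB d fuel [] V G = (V, G) := by
      intro V G; cases fuel <;> simp [pvLoopB]
    rw [hA, hnil] at hb
    rw [hb]
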